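-- pv_equiv track=rewrite | github.com/boddusaiganesh/openev | graders.py | _clause_type_family_match
-- ===== SOURCE A (Python) =====
-- def _clause_type_family_match(agent_type: str, truth_type: str) -> bool:
--     families = {
--         "liability":   {"indemnification", "limitation_of_liability", "warranty", "insurance"},
--         "restrictive": {"non_compete", "confidentiality", "intellectual_property"},
--         "governance":  {"governing_law", "dispute_resolution", "assignment"},
--         "commercial":  {"payment_terms", "representations", "termination"},
--         "external":    {"force_majeure", "data_protection"},
--     }
--     for members in families.values():
--         if agent_type in members and truth_type in members:
--             return True
--     return False
-- ===== SOURCE B (Python) =====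
-- def _clause_type_family_match(agent_type: str, truth_type: str) -> bool:
--     families = {
--         "liability":   {"indemnification", "limitation_of_liability", "warranty", "insurance"},
--         "restrictive": {"non_compete", "confidentiality", "intellectual_property"},
--         "governance":  {"governing_law", "dispute_resolution", "assignment"},
--         "commercial":  {"payment_terms", "representations", "termination"},
--         "external":    {"force_majeure", "data_protection"},
--     }
--     type_to_family = {t: fam for fam, members in families.items() for t in members}
--     fam = type_to_family.get(agent_type)
--     return fam is not None and fam == type_to_family.get(truth_type)
-- ===== Notes on version B (the rewrite author's own statement) =====
-- stated objective: idiomatic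
-- what changed: Replaces the per-family double-membership loop with a reverse index (clause type -> family name) built once, deciding the result by two dict lookups and one comparison with a None sentinel.
import Mathlib
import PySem

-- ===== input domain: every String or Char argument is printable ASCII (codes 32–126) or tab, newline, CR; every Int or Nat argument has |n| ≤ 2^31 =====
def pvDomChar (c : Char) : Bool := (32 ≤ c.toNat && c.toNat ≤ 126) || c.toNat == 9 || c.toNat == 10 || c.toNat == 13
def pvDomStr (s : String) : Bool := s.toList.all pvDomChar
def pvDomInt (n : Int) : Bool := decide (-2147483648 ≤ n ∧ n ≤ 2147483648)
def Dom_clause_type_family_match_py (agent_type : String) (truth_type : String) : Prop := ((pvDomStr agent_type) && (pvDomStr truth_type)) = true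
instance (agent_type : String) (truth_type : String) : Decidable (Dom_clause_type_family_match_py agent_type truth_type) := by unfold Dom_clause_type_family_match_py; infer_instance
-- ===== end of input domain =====

-- B replaces A's per-family double-membership loop with a reverse index (type -> family
-- name) built once, deciding by two lookups and one comparison (idiomatic; same cost).

-- ===== PORT A =====
-- families.values(): the five member sets, in insertion order
def pvFamSetsA : List (PySem.Set String) :=
  [PySem.Set.ofList ["indemnification", "limitation_of_liability", "warranty", "insurance"],
   PySem.Set.ofList ["non_compete", "confidentiality", "intellectual_property"],
   PySem.Set.ofList ["governing_law", "dispute_resolution", "assignment"],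
   PySem.Set.ofList ["payment_terms", "representations", "termination"],
   PySem.Set.ofList ["force_majeure", "data_protection"]]

-- the for-loop with early 'return True', else 'return False'
def pvFamLoopA (agent_type truth_type : String) : List (PySem.Set String) → Bool
  | [] => false
  | members :: rest =>
      if members.contains agent_type && members.contains truth_type then true
      else pvFamLoopA agent_type truth_type rest

def clause_type_family_match_py (agent_type : String) (truth_type : String) : Bool :=
  pvFamLoopA agent_type truth_type pvFamSetsA

-- ===== PORT B =====
-- families.items(): (family name, member set) pairs, in insertion order
def pvFamItemsB : List (String × PySem.Set String) :=
  [("liability",   PySem.Set.ofList ["indemnification", "limitation_of_liability", "warranty", "insurance"]),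
   ("restrictive", PySem.Set.ofList ["non_compete", "confidentiality", "intellectual_property"]),
   ("governance",  PySem.Set.ofList ["governing_law", "dispute_resolution", "assignment"]),
   ("commercial",  PySem.Set.ofList ["payment_terms", "representations", "termination"]),
   ("external",    PySem.Set.ofList ["force_majeure", "data_protection"])]

-- {t: fam for fam, members in families.items() for t in members}
def pvTypeToFamily : PySem.Dict String String :=
  pvFamItemsB.foldl
    (fun d p => p.2.foldl (fun d t => d.insert t p.1) d)
    PySem.Dict.empty

-- 'fam is not None and fam == get(truth_type)': a str never equals None, so a missing
-- truth_type lookup yields False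
def clause_type_family_match_py_alt (agent_type : String) (truth_type : String) : Bool :=
  match pvTypeToFamily.get? agent_type with
  | none => false
  | some fam =>
      match pvTypeToFamily.get? truth_type with
      | none => false
      | some g => fam == g

-- ===== PRECONDITION & SPEC =====
def Spec_clause_type_family_match_py (agent_type : String) (truth_type : String) (out : Bool) : Prop := out = clause_type_family_match_py_alt agent_type truth_type
instance (agent_type : String) (truth_type : String) (out : Bool) : Decidable (Spec_clause_type_family_match_py agent_type truth_type out) := by unfold Spec_clause_type_family_match_py; infer_instance

-- ===== CLAIM (what is proved, stated in full; the proofs are below) =====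
def Claim_equal_clause_type_family_match_py : Prop := ∀ (agent_type : String) (truth_type : String), Dom_clause_type_family_match_py agent_type truth_type → Spec_clause_type_family_match_py agent_type truth_type (clause_type_family_match_py agent_type truth_type)

-- ===== LEMMAS AND PROOFS =====
-- all clause types occurring in any family
def pvAllTypes : List String :=
  ["indemnification", "limitation_of_liability", "warranty", "insurance",
   "non_compete", "confidentiality", "intellectual_property",
   "governing_law", "dispute_resolution", "assignment",
   "payment_terms", "representations", "termination",
   "force_majeure", "data_protection"]

theorem a_false_left (a t : String) (h : a ∉ pvAllTypes) :
    clause_type_family_match_py a t = false := by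
  simp [pvAllTypes] at h
  obtain ⟨h1, h2, h3, h4, h5, h6, h7, h8, h9, h10, h11, h12, h13, h14, h15⟩ := h
  simp [clause_type_family_match_py, pvFamLoopA, pvFamSetsA, PySem.Set.contains,
        PySem.Set.ofList, h1, h2, h3, h4, h5, h6, h7, h8, h9, h10,
        h11, h12, h13, h14, h15]

theorem a_false_right (a t : String) (h : t ∉ pvAllTypes) :
    clause_type_family_match_py a t = false := by
  simp [pvAllTypes] at h
  obtain ⟨h1, h2, h3, h4, h5, h6, h7, h8, h9, h10, h11, h12, h13, h14, h15⟩ := h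
  simp [clause_type_family_match_py, pvFamLoopA, pvFamSetsA, PySem.Set.contains,
        PySem.Set.ofList, h1, h2, h3, h4, h5, h6, h7, h8, h9, h10,
        h11, h12, h13, h14, h15]

theorem b_false_left (a t : String) (h : a ∉ pvAllTypes) :
    clause_type_family_match_py_alt a t = false := by
  simp [pvAllTypes] at h
  obtain ⟨h1, h2, h3, h4, h5, h6, h7, h8, h9, h10, h11, h12, h13, h14, h15⟩ := h
  simp [clause_type_family_match_py_alt, pvTypeToFamily, pvFamItemsB, PySem.Dict.get?,
        PySem.Dict.insert, PySem.Dict.empty, PySem.Set.ofList, List.find?,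
        beq_eq_false_iff_ne.mpr (Ne.symm h1), beq_eq_false_iff_ne.mpr (Ne.symm h2),
        beq_eq_false_iff_ne.mpr (Ne.symm h3), beq_eq_false_iff_ne.mpr (Ne.symm h4),
        beq_eq_false_iff_ne.mpr (Ne.symm h5), beq_eq_false_iff_ne.mpr (Ne.symm h6),
        beq_eq_false_iff_ne.mpr (Ne.symm h7), beq_eq_false_iff_ne.mpr (Ne.symm h8),
        beq_eq_false_iff_ne.mpr (Ne.symm h9), beq_eq_false_iff_ne.mpr (Ne.symm h10),
        beq_eq_false_iff_ne.mpr (Ne.symm h11), beq_eq_false_iff_ne.mpr (Ne.symm h12),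
        beq_eq_false_iff_ne.mpr (Ne.symm h13), beq_eq_false_iff_ne.mpr (Ne.symm h14),
        beq_eq_false_iff_ne.mpr (Ne.symm h15)]

theorem b_false_right (a t : String) (h : t ∉ pvAllTypes) :
    clause_type_family_match_py_alt a t = false := by
  simp [pvAllTypes] at h
  obtain ⟨h1, h2, h3, h4, h5, h6, h7, h8, h9, h10, h11, h12, h13, h14, h15⟩ := h
  simp [clause_type_family_match_py_alt, pvTypeToFamily, pvFamItemsB, PySem.Dict.get?,
        PySem.Dict.insert, PySem.Dict.empty, PySem.Set.ofList, List.find?,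
        beq_eq_false_iff_ne.mpr (Ne.symm h1), beq_eq_false_iff_ne.mpr (Ne.symm h2),
        beq_eq_false_iff_ne.mpr (Ne.symm h3), beq_eq_false_iff_ne.mpr (Ne.symm h4),
        beq_eq_false_iff_ne.mpr (Ne.symm h5), beq_eq_false_iff_ne.mpr (Ne.symm h6),
        beq_eq_false_iff_ne.mpr (Ne.symm h7), beq_eq_false_iff_ne.mpr (Ne.symm h8),
        beq_eq_false_iff_ne.mpr (Ne.symm h9), beq_eq_false_iff_ne.mpr (Ne.symm h10),
        beq_eq_false_iff_ne.mpr (Ne.symm h11), beq_eq_false_iff_ne.mpr (Ne.symm h12),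
        beq_eq_false_iff_ne.mpr (Ne.symm h13), beq_eq_false_iff_ne.mpr (Ne.symm h14),
        beq_eq_false_iff_ne.mpr (Ne.symm h15)]
  split <;> rfl

-- ===== VERDICT (by name: the statement is the Claim_ definition above) =====
theorem clause_type_family_match_py_spec : Claim_equal_clause_type_family_match_py := by
  intro a t _
  unfold Spec_clause_type_family_match_py
  by_cases ha : a ∈ pvAllTypes
  · by_cases ht : t ∈ pvAllTypes
    · fin_cases ha <;> fin_cases ht <;> decide
    · rw [a_false_right a t ht, b_false_right a t ht]
  · rw [a_false_left a t ha, b_false_left a t ha]
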